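-- pv_equiv track=rewrite | github.com/rupeshkofficial/Silver_Automation | SilverAutoCheck_ui.py | find_matching_strike
-- ===== SOURCE A (Python) =====
-- def find_matching_strike(target_strike, available_strikes):
--     """Find matching strike from available strikes on website"""
--     # First try exact match
--     if target_strike in available_strikes:
--         return target_strike
--
--     # Try fuzzy matching with different formats
--     target_clean = target_strike.replace(',', '').replace('.00', '')
--
--     for strike in available_strikes:
--         strike_clean = strike.replace(',', '').replace('.00', '')
--         if target_clean == strike_clean:
--             return strike
--
--     # Try partial matching (last 5 digits for silver strikes)
--     if len(target_clean) >= 5: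
--         target_last5 = target_clean[-5:]
--
--         for strike in available_strikes:
--             strike_clean = strike.replace(',', '').replace('.00', '')
--             if len(strike_clean) >= 5:
--                 strike_last5 = strike_clean[-5:]
--                 if target_last5 == strike_last5:
--                     return strike
--
--     return None
-- ===== SOURCE B (Python) =====
-- def find_matching_strike(target_strike, available_strikes):
--     """Single fused pass with an accumulator: precompute the target's forms once,
--     then walk the list once recording the first hit at each match level
--     (exact / cleaned / last-5), and resolve by precedence at the end."""
--     target_clean = target_strike.replace(',', '').replace('.00', '')
--     target_last5 = target_clean[-5:] if len(target_clean) >= 5 else None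
--
--     exact = clean_hit = last5_hit = None
--     for strike in available_strikes:
--         if exact is None and strike == target_strike:
--             exact = strike
--         if clean_hit is None or last5_hit is None:
--             c = strike.replace(',', '').replace('.00', '')
--             if clean_hit is None and c == target_clean:
--                 clean_hit = strike
--             if last5_hit is None and target_last5 is not None \
--                     and len(c) >= 5 and c[-5:] == target_last5:
--                 last5_hit = strike
--
--     if exact is not None:
--         return target_strike
--     if clean_hit is not None:
--         return clean_hit
--     return last5_hit
-- ===== Notes on version B (the rewrite author's own statement) =====
-- stated objective: alternative
-- what changed: Replaces A's three staged scans (membership test, cleaned-form loop, last-5 loop) with one fused pass carrying a three-slot accumulator of first hits per match level, the target's cleaned/last-5 forms computed once up front and each strike cleaned at most once, followed by a precedence resolution.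
import Mathlib
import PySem

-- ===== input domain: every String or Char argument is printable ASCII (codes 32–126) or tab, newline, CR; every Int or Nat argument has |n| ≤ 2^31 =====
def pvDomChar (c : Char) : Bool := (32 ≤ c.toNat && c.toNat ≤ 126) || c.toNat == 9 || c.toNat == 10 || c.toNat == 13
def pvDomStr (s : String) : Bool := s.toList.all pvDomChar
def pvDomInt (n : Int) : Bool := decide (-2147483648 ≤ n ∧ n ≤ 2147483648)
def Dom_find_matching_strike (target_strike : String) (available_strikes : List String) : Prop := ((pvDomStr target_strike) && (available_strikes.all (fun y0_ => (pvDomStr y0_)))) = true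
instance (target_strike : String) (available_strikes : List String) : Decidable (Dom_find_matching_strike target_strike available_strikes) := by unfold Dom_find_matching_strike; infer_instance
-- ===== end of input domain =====

-- B fuses A's three staged scans into one pass carrying a three-slot accumulator
-- of first hits per match level, resolved by precedence at the end; objective:
-- alternative structure (same asymptotic cost).

-- ===== PORT A =====
-- shared helper: strike.replace(',', '').replace('.00', '')
def pvClean (s : String) : String :=
  PySem.Str.replace (PySem.Str.replace s "," "") ".00" ""

def find_matching_strike (target_strike : String) (available_strikes : List String) : Option String :=
  if available_strikes.contains target_strike then some target_strike
  else
    -- first for-loop: return the first strike whose cleaned form equals target_clean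
    match available_strikes.find? (fun strike => pvClean strike == pvClean target_strike) with
    | some strike => some strike
    | none =>
      if 5 ≤ PySem.Str.len (pvClean target_strike) then
        -- second for-loop: first strike with len(clean) >= 5 and clean[-5:] == target_last5
        available_strikes.find? (fun strike =>
          decide (5 ≤ PySem.Str.len (pvClean strike)) &&
            (PySem.Str.slice (pvClean strike) (some (-5)) none ==
              PySem.Str.slice (pvClean target_strike) (some (-5)) none))
      else none

-- ===== PORT B =====
-- c[-5:]
def pvLast5 (c : String) : String := PySem.Str.slice c (some (-5)) none

-- loop body of B's single fused pass: update the (exact, clean_hit, last5_hit) slots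
def pvScan (t tclean : String) (tlast5 : Option String)
    (st : Option String × Option String × Option String) (strike : String) :
    Option String × Option String × Option String :=
  let ex := if st.1.isNone && (strike == t) then some strike else st.1
  if st.2.1.isNone || st.2.2.isNone then
    let c := pvClean strike
    (ex,
     (if st.2.1.isNone && (c == tclean) then some strike else st.2.1),
     (if st.2.2.isNone && tlast5.isSome && decide (5 ≤ PySem.Str.len c)
          && (some (pvLast5 c) == tlast5) then some strike else st.2.2))
  else (ex, st.2)

def find_matching_strike_alt (target_strike : String) (available_strikes : List String) : Option String :=
  let tclean := pvClean target_strike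
  let tlast5 := if 5 ≤ PySem.Str.len tclean then some (pvLast5 tclean) else none
  let r := available_strikes.foldl (pvScan target_strike tclean tlast5) (none, none, none)
  match r.1 with
  | some _ => some target_strike
  | none =>
    match r.2.1 with
    | some s => some s
    | none => r.2.2

-- ===== PRECONDITION & SPEC =====
def Spec_find_matching_strike (target_strike : String) (available_strikes : List String) (out : Option String) : Prop := out = find_matching_strike_alt target_strike available_strikes
instance (target_strike : String) (available_strikes : List String) (out : Option String) : Decidable (Spec_find_matching_strike target_strike available_strikes out) := by unfold Spec_find_matching_strike; infer_instance

-- ===== CLAIM (what is proved, stated in full; the proofs are below) =====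
def Claim_equal_find_matching_strike : Prop := ∀ (target_strike : String) (available_strikes : List String), Dom_find_matching_strike target_strike available_strikes → Spec_find_matching_strike target_strike available_strikes (find_matching_strike target_strike available_strikes)

-- ===== LEMMAS AND PROOFS =====

-- the fused fold computes, slot by slot, "previous hit orElse first match of this slot's predicate"
theorem pvScan_foldl (t tclean : String) (tlast5 : Option String) (av : List String)
    (e c l : Option String) :
    av.foldl (pvScan t tclean tlast5) (e, c, l)
      = (e.or (av.find? (fun s => s == t)),
         c.or (av.find? (fun s => pvClean s == tclean)),
         l.or (av.find? (fun s => tlast5.isSome && decide (5 ≤ PySem.Str.len (pvClean s))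
            && (some (pvLast5 (pvClean s)) == tlast5)))) := by
  induction av generalizing e c l with
  | nil => simp only [List.foldl_nil, List.find?_nil, Option.or_none]
  | cons s rest ih =>
    rw [List.foldl_cons]
    have hstep : pvScan t tclean tlast5 (e, c, l) s
        = ((if e.isNone && (s == t) then some s else e),
           (if c.isNone && (pvClean s == tclean) then some s else c),
           (if l.isNone && tlast5.isSome && decide (5 ≤ PySem.Str.len (pvClean s))
                && (some (pvLast5 (pvClean s)) == tlast5) then some s else l)) := by
      cases c <;> cases l <;> rfl
    rw [hstep, ih]
    simp only [List.find?_cons]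
    generalize (s == t) = b1
    generalize (pvClean s == tclean) = b2
    generalize (some (pvLast5 (pvClean s)) == tlast5) = b4
    generalize (decide (5 ≤ PySem.Str.len (pvClean s))) = b3
    generalize tlast5.isSome = b0
    cases e <;> cases c <;> cases l <;> cases b1 <;> cases b2 <;> cases b0 <;> cases b3 <;> cases b4 <;> rfl

-- membership test as the exact-slot find?
theorem pvContains_find? (t : String) (av : List String) :
    (av.find? (fun s => s == t)).isSome = av.contains t := by
  induction av with
  | nil => rfl
  | cons s rest ih =>
    rw [List.contains_cons, BEq.comm]
    by_cases h : (s == t) = true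
    · rw [List.find?_cons_of_pos (p := fun x => x == t) h, h, Bool.true_or]; rfl
    · simp only [Bool.not_eq_true] at h
      rw [List.find?_cons_of_neg (p := fun x => x == t) (by simp [h]), h, Bool.false_or, ih]

-- B's result with the fold replaced by the three find?s
theorem pvAlt_char (t : String) (av : List String) :
    find_matching_strike_alt t av
      = (match av.find? (fun s => s == t) with
         | some _ => some t
         | none =>
           match av.find? (fun s => pvClean s == pvClean t) with
           | some s => some s
           | none => av.find? (fun s =>
               (if 5 ≤ PySem.Str.len (pvClean t) then some (pvLast5 (pvClean t)) else none).isSome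
               && decide (5 ≤ PySem.Str.len (pvClean s))
               && (some (pvLast5 (pvClean s)) ==
                   (if 5 ≤ PySem.Str.len (pvClean t) then some (pvLast5 (pvClean t)) else none)))) := by
  unfold find_matching_strike_alt
  simp only [pvScan_foldl, Option.none_or]

-- ===== VERDICT (by name: the statement is the Claim_ definition above) =====
theorem find_matching_strike_spec : Claim_equal_find_matching_strike := by
  intro t av _
  show find_matching_strike t av = find_matching_strike_alt t av
  rw [pvAlt_char]
  unfold find_matching_strike
  cases hfe : av.find? (fun s => s == t) with
  | some v =>
    have hc : av.contains t = true := by rw [← pvContains_find?, hfe]; rfl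
    rw [if_pos hc]
  | none =>
    have hc : av.contains t = false := by rw [← pvContains_find?, hfe]; rfl
    rw [if_neg (by rw [hc]; exact Bool.false_ne_true)]
    cases hfc : av.find? (fun s => pvClean s == pvClean t) with
    | some v => rfl
    | none =>
      show (if 5 ≤ PySem.Str.len (pvClean t) then _ else none) = _
      by_cases h5 : 5 ≤ PySem.Str.len (pvClean t)
      · have hpred : (fun s =>
              (if 5 ≤ PySem.Str.len (pvClean t) then some (pvLast5 (pvClean t)) else none).isSome
              && decide (5 ≤ PySem.Str.len (pvClean s))
              && (some (pvLast5 (pvClean s)) ==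
                  (if 5 ≤ PySem.Str.len (pvClean t) then some (pvLast5 (pvClean t)) else none)))
            = (fun s => decide (5 ≤ PySem.Str.len (pvClean s)) &&
              (PySem.Str.slice (pvClean s) (some (-5)) none ==
                PySem.Str.slice (pvClean t) (some (-5)) none)) := by
          funext s
          simp only [if_pos h5, Option.isSome_some, Bool.true_and, Option.some_beq_some, pvLast5]
        rw [if_pos h5, hpred]
      · have hpred : (fun s =>
              (if 5 ≤ PySem.Str.len (pvClean t) then some (pvLast5 (pvClean t)) else none).isSome
              && decide (5 ≤ PySem.Str.len (pvClean s))
              && (some (pvLast5 (pvClean s)) ==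
                  (if 5 ≤ PySem.Str.len (pvClean t) then some (pvLast5 (pvClean t)) else none)))
            = (fun _ => false) := by
          funext s
          simp only [if_neg h5, Option.isSome_none, Bool.false_and]
        rw [if_neg h5, hpred, eq_comm, List.find?_eq_none]
        intro x _; exact Bool.false_ne_true
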